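-- pv_equiv track=rewrite | github.com/sveee/advent-of-code | aoc/2023/14.py | part2
-- ===== SOURCE A (Python) =====
-- directions = {
--     'north': (-1, 0),
--     'west': (0, -1),
--     'south': (1, 0),
--     'east': (0, 1),
-- }
--
-- def roll_direction(grid, direction):
--     n, m = len(grid), len(grid[0])
--     dx, dy = directions[direction]
--     if direction == 'north':
--         points = [(x, y) for x in range(n) for y in range(m)]
--     elif direction == 'west':
--         points = [(x, y) for y in range(m) for x in range(n)]
--     elif direction == 'south':
--         points = [(x, y) for x in range(n - 1, -1, -1) for y in range(m)]
--     elif direction == 'east':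
--         points = [(x, y) for y in range(m - 1, -1, -1) for x in range(n)]
--     for x, y in points:
--         if grid[x][y] != 'O':
--             continue
--         cx, cy = x, y
--         while 0 <= cx + dx < n and 0 <= cy + dy < m and grid[cx + dx][cy + dy] == '.':
--             cx, cy = cx + dx, cy + dy
--         grid[x][y] = '.'
--         grid[cx][cy] = 'O'
--     return grid
--
-- def calculate_load(grid):
--     return sum(
--         (len(grid) - row_index) * row.count('O') for row_index, row in enumerate(grid)
--     )
--
-- def part2(text):
--     grid = [list(line) for line in text.splitlines()]
--     grid_to_step, step_to_grid = {}, {}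
--     n, cycle_size, cycle_start = 1_000_000_000, 0, 0
--     for cycle_id in range(n):
--         state = '\n'.join(''.join(row) for row in grid)
--         if state in grid_to_step:
--             cycle_size, cycle_start = (
--                 len(grid_to_step) - grid_to_step[state],
--                 grid_to_step[state],
--             )
--             break
--         grid_to_step[state] = cycle_id
--         step_to_grid[cycle_id] = state.splitlines()
--         for direction in directions:
--             grid = roll_direction(grid, direction)
--     return calculate_load(
--         step_to_grid[
--             (n - cycle_start) % cycle_size + cycle_start if n > cycle_start else n
--         ]
--     )
-- ===== SOURCE B (Python) =====
-- def _tilt(seq):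
--     # pack the rocks of each free run against the left wall, one streaming pass
--     out = []
--     dots = 0
--     for c in seq:
--         if c == '.':
--             dots += 1
--         elif c == 'O':
--             out.append('O')
--         else:
--             out.extend(['.'] * dots)
--             out.append(c)
--             dots = 0
--     out.extend(['.'] * dots)
--     return out
--
-- def _spin(grid):
--     n, m = len(grid), len(grid[0])
--     # north: pack each column upward
--     cols = [_tilt([grid[x][y] for x in range(n)]) for y in range(m)]
--     grid = [[cols[y][x] for y in range(m)] for x in range(n)]
--     # west: pack each row leftward
--     grid = [_tilt(row) for row in grid]
--     # south: pack each column downward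
--     cols = [_tilt([grid[x][y] for x in range(n - 1, -1, -1)]) for y in range(m)]
--     grid = [[cols[y][n - 1 - x] for y in range(m)] for x in range(n)]
--     # east: pack each row rightward
--     grid = [list(reversed(_tilt(list(reversed(row))))) for row in grid]
--     return grid
--
-- def part2(text):
--     grid = [list(line) for line in text.splitlines()]
--     grid_to_step, step_to_grid = {}, {}
--     n, cycle_size, cycle_start = 1_000_000_000, 0, 0
--     for cycle_id in range(n):
--         state = '\n'.join(''.join(row) for row in grid)
--         if state in grid_to_step:
--             cycle_size, cycle_start = (
--                 len(grid_to_step) - grid_to_step[state],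
--                 grid_to_step[state],
--             )
--             break
--         grid_to_step[state] = cycle_id
--         step_to_grid[cycle_id] = state.splitlines()
--         grid = _spin(grid)
--     rows = step_to_grid[
--         (n - cycle_start) % cycle_size + cycle_start if n > cycle_start else n
--     ]
--     return sum((len(rows) - i) * row.count('O') for i, row in enumerate(rows))
-- ===== Notes on version B (the rewrite author's own statement) =====
-- stated objective: alternative
-- what changed: The per-rock while-loop scan over all grid cells in each tilt is replaced by a single streaming pass per row/column (reversed or column-extracted per direction) that packs each run of free cells, keeping A's cycle-detection outer loop.
-- outside the precondition, e.g. on part2('O\n.O'): A returns 2, B returns 1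
import Mathlib
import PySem

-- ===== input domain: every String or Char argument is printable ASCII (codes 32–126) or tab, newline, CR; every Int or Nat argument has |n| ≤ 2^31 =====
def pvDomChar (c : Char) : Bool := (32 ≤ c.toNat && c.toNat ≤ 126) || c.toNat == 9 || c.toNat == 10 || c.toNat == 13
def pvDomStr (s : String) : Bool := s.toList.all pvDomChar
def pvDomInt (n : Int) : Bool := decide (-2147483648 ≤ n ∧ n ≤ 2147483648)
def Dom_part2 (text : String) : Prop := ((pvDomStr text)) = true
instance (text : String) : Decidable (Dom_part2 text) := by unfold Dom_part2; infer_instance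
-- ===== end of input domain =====

-- B replaces A's per-rock while-loop scan in each tilt by one streaming run-packing pass per
-- row/column (same cycle-detection outer loop): an alternative tilt algorithm, not claimed faster.

-- ===== PORT A =====

-- grid[x][y] / grid[x][y] = c: every Python access is guarded by 0 ≤ index < len, so the
-- total getD/set forms are exact at every use site.
def cellGet (g : List (List Char)) (x y : Int) : Char :=
  (g.getD x.toNat []).getD y.toNat ' '

def cellSet (g : List (List Char)) (x y : Int) (c : Char) : List (List Char) :=
  g.set x.toNat ((g.getD x.toNat []).set y.toNat c)

-- the `while 0 <= cx+dx < n and 0 <= cy+dy < m and grid[cx+dx][cy+dy] == '.'` loop; the rock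
-- moves at most max(n,m) ≤ (n+m) steps, so fuel (n+m).toNat makes the port exact.
def rollWhile (g : List (List Char)) (n m dx dy : Int) : Nat → Int → Int → Int × Int
  | 0, cx, cy => (cx, cy)
  | fuel+1, cx, cy =>
    if 0 ≤ cx + dx ∧ cx + dx < n ∧ 0 ≤ cy + dy ∧ cy + dy < m ∧ cellGet g (cx + dx) (cy + dy) = '.' then
      rollWhile g n m dx dy fuel (cx + dx) (cy + dy)
    else (cx, cy)

-- the body of `for x, y in points`
def rollStep (n m dx dy : Int) (g : List (List Char)) (p : Int × Int) : List (List Char) :=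
  if cellGet g p.1 p.2 ≠ 'O' then g
  else
    let cc := rollWhile g n m dx dy (n + m).toNat p.1 p.2
    cellSet (cellSet g p.1 p.2 '.') cc.1 cc.2 'O'

-- directions[direction]
def dirDelta (dir : String) : Int × Int :=
  if dir = "north" then (-1, 0) else if dir = "west" then (0, -1)
  else if dir = "south" then (1, 0) else (0, 1)

-- the four `points` comprehensions
def dirPoints (n m : Int) (dir : String) : List (Int × Int) :=
  if dir = "north" then
    (PySem.List.pyRange 0 n 1).flatMap (fun x => (PySem.List.pyRange 0 m 1).map (fun y => (x, y)))
  else if dir = "west" then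
    (PySem.List.pyRange 0 m 1).flatMap (fun y => (PySem.List.pyRange 0 n 1).map (fun x => (x, y)))
  else if dir = "south" then
    (PySem.List.pyRange (n - 1) (-1) (-1)).flatMap (fun x => (PySem.List.pyRange 0 m 1).map (fun y => (x, y)))
  else
    (PySem.List.pyRange (m - 1) (-1) (-1)).flatMap (fun y => (PySem.List.pyRange 0 n 1).map (fun x => (x, y)))

def rollDirection (g : List (List Char)) (dir : String) : List (List Char) :=
  -- n, m = len(grid), len(grid[0]); Python raises on an empty grid (outside Pre_)
  (dirPoints g.length (g.headD []).length dir).foldl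
    (rollStep g.length (g.headD []).length (dirDelta dir).1 (dirDelta dir).2) g

-- '\n'.join(''.join(row) for row in grid)
def stateOf (g : List (List Char)) : String :=
  PySem.Str.join "\n" (g.map (fun row => String.ofList row))

def calcLoad (rows : List String) : Int :=
  ((PySem.List.enumerate rows).map
    (fun p => ((rows.length : Int) - p.1) * (PySem.Str.count p.2 "O" : Int))).sum

-- the code after the loop (shared verbatim by both Pythons); if the loop ever exhausted its
-- 10^9 iterations without a repeated state, Python would divide by cycle_size = 0 (both ports
-- then return this same total function's value instead).
def finishLoad (s2g : PySem.Dict Int (List String)) (cycleSize cycleStart : Int) : Int :=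
  let nTotal : Int := 1000000000
  let idx := if nTotal > cycleStart then PySem.Int.mod (nTotal - cycleStart) cycleSize + cycleStart else nTotal
  calcLoad ((s2g.get? idx).getD [])

def part2LoopA : Nat → Int → List (List Char) → PySem.Dict String Int → PySem.Dict Int (List String) → Int
  | 0, _, _, _, s2g => finishLoad s2g 0 0
  | fuel+1, cycleId, grid, g2s, s2g =>
    let state := stateOf grid
    match g2s.get? state with
    | some s => finishLoad s2g ((g2s.size : Int) - s) s
    | none =>
      part2LoopA fuel (cycleId + 1)
        (["north", "west", "south", "east"].foldl rollDirection grid)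
        (g2s.insert state cycleId) (s2g.insert cycleId (PySem.Str.splitlines state))

def part2 (text : String) : Int :=
  part2LoopA 1000000000 0 ((PySem.Str.splitlines text).map String.toList)
    PySem.Dict.empty PySem.Dict.empty

-- ===== PORT B =====

-- one streaming pass of _tilt: (settled output, pending dots of the current run)
def tiltStep (st : List Char × Nat) (c : Char) : List Char × Nat :=
  if c = '.' then (st.1, st.2 + 1)
  else if c = 'O' then (st.1 ++ ['O'], st.2)
  else (st.1 ++ List.replicate st.2 '.' ++ [c], 0)

def tiltRun (l : List Char) : List Char :=
  let st := l.foldl tiltStep ([], 0)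
  st.1 ++ List.replicate st.2 '.'

-- [grid[x][y] for x in range(n)] (every access in range on the rectangular grids B is run on)
def colOf (g : List (List Char)) (y : Nat) : List Char := g.map (fun r => r.getD y ' ')

def spinAlt (g : List (List Char)) : List (List Char) :=
  let n := g.length
  let m := (g.headD []).length
  let cols1 := (List.range m).map (fun y => tiltRun (colOf g y))
  let g1 := (List.range n).map (fun x => (List.range m).map (fun y => (cols1.getD y []).getD x ' '))
  let g2 := g1.map tiltRun
  let cols2 := (List.range m).map (fun y => tiltRun (colOf g2 y).reverse)
  let g3 := (List.range n).map (fun x => (List.range m).map (fun y => (cols2.getD y []).getD (n - 1 - x) ' '))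
  g3.map (fun row => (tiltRun row.reverse).reverse)

def part2LoopB : Nat → Int → List (List Char) → PySem.Dict String Int → PySem.Dict Int (List String) → Int
  | 0, _, _, _, s2g => finishLoad s2g 0 0
  | fuel+1, cycleId, grid, g2s, s2g =>
    let state := stateOf grid
    match g2s.get? state with
    | some s => finishLoad s2g ((g2s.size : Int) - s) s
    | none =>
      part2LoopB fuel (cycleId + 1) (spinAlt grid)
        (g2s.insert state cycleId) (s2g.insert cycleId (PySem.Str.splitlines state))

def part2_alt (text : String) : Int :=
  part2LoopB 1000000000 0 ((PySem.Str.splitlines text).map String.toList)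
    PySem.Dict.empty PySem.Dict.empty

-- ===== PRECONDITION & SPEC =====
-- Pre_ excludes the empty grid (A raises IndexError on len(grid[0])) and non-rectangular input,
-- malformed for this puzzle: there A indexes only within the first line's width (raising when a
-- later line is shorter), while B tilts every full line.
def Pre_part2 (text : String) : Prop :=
  PySem.Str.splitlines text ≠ [] ∧
  ∀ l ∈ PySem.Str.splitlines text, l.toList.length = ((PySem.Str.splitlines text).headD "").toList.length
instance (text : String) : Decidable (Pre_part2 text) := by unfold Pre_part2; infer_instance

def pvWitness_part2 : String := "O.\n#."

def Spec_part2 (text : String) (out : Int) : Prop := out = part2_alt text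
instance (text : String) (out : Int) : Decidable (Spec_part2 text out) := by unfold Spec_part2; infer_instance

-- ===== CLAIM (what is proved, stated in full; the proofs are below) =====
def Claim_equal_part2 : Prop := ∀ (text : String), Dom_part2 text → Pre_part2 text → Spec_part2 text (part2 text)

-- ===== LEMMAS AND PROOFS =====

-- a grid is rectangular: every row as long as the first
def RectG (g : List (List Char)) : Prop := ∀ r ∈ g, r.length = (g.headD []).length

-- ---------- shape preservation (A's steps only overwrite cells in place) ----------

theorem shape_cellSet (g : List (List Char)) (x y : Int) (c : Char) :
    (cellSet g x y c).map List.length = g.map List.length := by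
  unfold cellSet
  rcases lt_or_ge x.toNat g.length with h | h
  · rw [List.map_set]
    have h1 : ((g.getD x.toNat []).set y.toNat c).length = g[x.toNat].length := by
      simp [List.getD, List.getElem?_eq_getElem h]
    have h2 : g[x.toNat].length = (g.map List.length)[x.toNat]'(by simpa using h) := by simp
    rw [h1, h2, List.set_getElem_self]
  · rw [List.set_eq_of_length_le h]

theorem shape_rollStep (n m dx dy : Int) (g : List (List Char)) (p : Int × Int) :
    (rollStep n m dx dy g p).map List.length = g.map List.length := by
  unfold rollStep
  split
  · rfl
  · rw [shape_cellSet, shape_cellSet]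

theorem shape_foldl {π : Type} (step : List (List Char) → π → List (List Char))
    (hs : ∀ g p, (step g p).map List.length = g.map List.length) :
    ∀ (ps : List π) (g : List (List Char)),
      (ps.foldl step g).map List.length = g.map List.length := by
  intro ps
  induction ps with
  | nil => intro g; rfl
  | cons p ps ih => intro g; rw [List.foldl_cons, ih, hs]

theorem shape_rollDirection (g : List (List Char)) (dir : String) :
    (rollDirection g dir).map List.length = g.map List.length :=
  shape_foldl _ (fun g p => shape_rollStep _ _ _ _ g p) _ g

theorem shape_spinA (g : List (List Char)) :
    (["north", "west", "south", "east"].foldl rollDirection g).map List.length = g.map List.length := by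
  simp only [List.foldl_cons, List.foldl_nil]
  rw [shape_rollDirection, shape_rollDirection, shape_rollDirection, shape_rollDirection]

-- ---------- generic fold lemmas ----------

theorem foldl_eq_inv {σ π : Type} (Inv : σ → Prop) (s1 s2 : σ → π → σ) :
    ∀ (ps : List π) (g : σ), Inv g →
    (∀ h p, Inv h → p ∈ ps → s1 h p = s2 h p ∧ Inv (s1 h p)) →
    ps.foldl s1 g = ps.foldl s2 g := by
  intro ps
  induction ps with
  | nil => intros; rfl
  | cons p ps ih =>
    intro g hg hstep
    have h1 := hstep g p hg (by simp)
    simp only [List.foldl_cons]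
    rw [← h1.1]
    exact ih _ h1.2 (fun h q hh hq => hstep h q hh (by simp [hq]))

theorem foldl_conj {σ τ π ρ : Type} (F : σ → τ) (sf : π → ρ)
    (s1 : σ → π → σ) (s2 : τ → ρ → τ) (Inv : σ → Prop) :
    ∀ (ps : List π) (g : σ), Inv g →
    (∀ h p, Inv h → p ∈ ps → F (s1 h p) = s2 (F h) (sf p) ∧ Inv (s1 h p)) →
    F (ps.foldl s1 g) = (ps.map sf).foldl s2 (F g) := by
  intro ps
  induction ps with
  | nil => intros; rfl
  | cons p ps ih =>
    intro g hg hstep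
    have h1 := hstep g p hg (by simp)
    simp only [List.foldl_cons, List.map_cons]
    rw [← h1.1]
    exact ih _ h1.2 (fun h q hh hq => hstep h q hh (by simp [hq]))

theorem foldl_map_swap {π : Type} (h : π → List Char → List Char) :
    ∀ (ys : List π) (g : List (List Char)),
      ys.foldl (fun g y => g.map (h y)) g = g.map (fun r => ys.foldl (fun r y => h y r) r) := by
  intro ys
  induction ys with
  | nil => intro g; simp
  | cons y ys ih =>
    intro g
    simp only [List.foldl_cons]
    rw [ih, List.map_map]
    rfl

-- ---------- transpose machinery ----------

def trG (k : Nat) (h : List (List Char)) : List (List Char) :=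
  (List.range k).map (fun y => colOf h y)

theorem getD_colOf (h : List (List Char)) (y x : Nat) (hx : x < h.length) :
    (colOf h y).getD x ' ' = h[x].getD y ' ' := by
  simp [colOf, List.getD, List.getElem?_eq_getElem hx]

theorem range_map_getD (r : List Char) :
    (List.range r.length).map (fun y => r.getD y ' ') = r := by
  apply List.ext_getElem (by simp)
  intro i h1 h2
  simp [List.getD, List.getElem?_eq_getElem h2]

theorem map_getD_of_length {β : Type} (h : List (List Char)) (m : Nat) (hm : h.length = m)
    (f : List Char → β) :
    (List.range m).map (fun y => f (h.getD y [])) = h.map f := by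
  subst hm
  apply List.ext_getElem (by simp)
  intro i h1 h2
  simp [List.getD, List.getElem?_eq_getElem (by simpa using h2)]

theorem colOf_trG (h : List (List Char)) (m : Nat) (x : Nat) :
    colOf (trG m h) x = (List.range m).map (fun y => (colOf h y).getD x ' ') := by
  simp only [trG, colOf, List.map_map]
  rfl

theorem getElem_trG (k : Nat) (h : List (List Char)) (x : Nat) (hx : x < k) :
    (trG k h)[x]'(by simpa [trG] using hx) = colOf h x := by
  simp [trG]

theorem trG_trG (h : List (List Char)) (m : Nat) (hr : ∀ r ∈ h, r.length = m) :
    trG h.length (trG m h) = h := by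
  apply List.ext_getElem (by simp [trG])
  intro x h1 h2
  have hx : x < h.length := h2
  rw [getElem_trG h.length (trG m h) x hx, colOf_trG]
  have step1 : (List.range m).map (fun y => (colOf h y).getD x ' ')
      = (List.range m).map (fun y => h[x].getD y ' ') :=
    List.map_congr_left (fun y _ => getD_colOf h y x hx)
  rw [step1]
  have hxm : h[x].length = m := hr h[x] (List.getElem_mem hx)
  rw [← hxm, range_map_getD]

-- ---------- 1D row machinery: A's per-rock scan of one line = B's streaming pass ----------

-- the west while-loop projected onto the single row it reads
def rowWhile (r : List Char) (m : Int) : Nat → Int → Int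
  | 0, cy => cy
  | fuel+1, cy =>
    if 0 ≤ cy - 1 ∧ cy - 1 < m ∧ r.getD (cy - 1).toNat ' ' = '.' then rowWhile r m fuel (cy - 1)
    else cy

-- the west body of the point loop projected onto the row
def rowStepW (m : Int) (fuel : Nat) (r : List Char) (y : Int) : List Char :=
  if r.getD y.toNat ' ' ≠ 'O' then r
  else (r.set y.toNat '.').set (rowWhile r m fuel y).toNat 'O'

def emitSt (st : List Char × Nat) : List Char := st.1 ++ List.replicate st.2 '.'

-- invariant of B's streaming state after t characters
def stOK (t : Nat) (st : List Char × Nat) : Prop :=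
  st.1.length + st.2 = t ∧ st.1.getLast? ≠ some '.'

theorem tiltStep_ok {t : Nat} {st : List Char × Nat} (h : stOK t st) (c : Char) :
    stOK (t + 1) (tiltStep st c) := by
  obtain ⟨hlen, hlast⟩ := h
  unfold tiltStep stOK
  split_ifs with h1 h2
  · exact ⟨by simp [← hlen]; omega, hlast⟩
  · constructor
    · simp [← hlen]; omega
    · simp [List.getLast?_append]
  · constructor
    · simp [← hlen]; omega
    · simp [List.getLast?_append]
      intro hc; exact absurd hc h1

theorem stOK_take (r : List Char) : ∀ t, t ≤ r.length → stOK t ((r.take t).foldl tiltStep ([], 0)) := by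
  intro t
  induction t with
  | zero => intro _; exact ⟨rfl, by simp⟩
  | succ t ih =>
    intro ht
    have htr : t < r.length := by omega
    rw [List.take_add_one, List.getElem?_eq_getElem htr]
    simp only [Option.toList, List.foldl_append, List.foldl_cons, List.foldl_nil]
    exact tiltStep_ok (ih (by omega)) _

theorem replicate_swap (d : Nat) (c : Char) (rest : List Char) :
    List.replicate d c ++ c :: rest = c :: (List.replicate d c ++ rest) := by
  rw [show (c :: rest) = [c] ++ rest from rfl, ← List.append_assoc, ← List.replicate_succ',
    List.replicate_succ, List.cons_append]

theorem rowWhile_stop (com rest : List Char) (m : Int) (hlast : com.getLast? ≠ some '.') :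
    ∀ fuel : Nat, rowWhile (com ++ rest) m fuel (com.length : Int) = (com.length : Int) := by
  intro fuel
  cases fuel with
  | zero => rfl
  | succ fuel =>
    rw [rowWhile]
    rw [if_neg]
    rintro ⟨h0, _, hdot⟩
    cases com with
    | nil => simp at h0
    | cons a l =>
      apply hlast
      have hlt : (a :: l).length - 1 < (a :: l).length := by simp
      have : ((a :: l).length : Int) - 1 = (((a :: l).length - 1 : Nat) : Int) := by
        push_cast [List.length_cons]; omega
      rw [this] at hdot
      simp only [Int.toNat_natCast] at hdot
      rw [List.getD_eq_getElem?_getD, List.getElem?_append_left hlt,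
        List.getElem?_eq_getElem hlt] at hdot
      simp only [Option.getD_some] at hdot
      rw [List.getLast?_eq_getElem?, List.getElem?_eq_getElem hlt, hdot]

theorem rowWhile_run (com rest : List Char) (d : Nat) (m : Int)
    (hlast : com.getLast? ≠ some '.') (hm : (com.length : Int) + d < m) :
    ∀ (fuel : Nat) (k : Nat), k ≤ d → k ≤ fuel →
      rowWhile (com ++ List.replicate d '.' ++ rest) m fuel ((com.length : Int) + k) = (com.length : Int) := by
  intro fuel
  induction fuel with
  | zero =>
    intro k hkd hk0
    have : k = 0 := by omega
    subst this
    simpa using rowWhile_stop com (List.replicate d '.' ++ rest) m hlast 0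
  | succ fuel ih =>
    intro k hkd hkf
    cases k with
    | zero => simpa using rowWhile_stop com (List.replicate d '.' ++ rest) m hlast (fuel + 1)
    | succ k =>
      rw [rowWhile, if_pos]
      · have : (com.length : Int) + (k + 1 : Nat) - 1 = (com.length : Int) + k := by push_cast; ring
        rw [this]
        exact ih k (by omega) (by omega)
      · refine ⟨by push_cast; omega, ?_, ?_⟩
        · push_cast; omega
        · have h1 : (com.length : Int) + (k + 1 : Nat) - 1 = ((com.length + k : Nat) : Int) := by
            push_cast; ring
          rw [h1, Int.toNat_natCast]
          have hk : k < d := by omega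
          rw [List.append_assoc, List.getD_eq_getElem?_getD, List.getElem?_append_right (by omega),
            List.getElem?_append_left (by simpa using hk)]
          simp [hk]

theorem getD_mid (pre : List Char) (c : Char) (tail : List Char) :
    (pre ++ c :: tail).getD pre.length ' ' = c := by
  rw [List.getD_eq_getElem?_getD, List.getElem?_append_right (le_refl _)]
  simp

theorem set_mid (pre : List Char) (c c' : Char) (tail : List Char) :
    (pre ++ c :: tail).set pre.length c' = pre ++ c' :: tail := by
  rw [List.set_append_right _ _ (le_refl _)]
  simp

theorem rowStepW_adv (r0 com : List Char) (d t : Nat) (m : Int) (fuel : Nat)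
    (ht : com.length + d = t) (htm : t < r0.length) (hm : m = (r0.length : Int))
    (hlast : com.getLast? ≠ some '.') (hfuel : d ≤ fuel) :
    rowStepW m fuel (com ++ List.replicate d '.' ++ r0.drop t) (t : Int)
      = emitSt (tiltStep (com, d) r0[t]) ++ r0.drop (t + 1) := by
  have hdrop : r0.drop t = r0[t] :: r0.drop (t + 1) := List.drop_eq_getElem_cons htm
  have hpre : (com ++ List.replicate d '.').length = t := by simp [ht]
  set c := r0[t] with hc
  set tail := r0.drop (t + 1) with htail
  have hl : com ++ List.replicate d '.' ++ r0.drop t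
      = (com ++ List.replicate d '.') ++ c :: tail := by
    rw [hdrop, List.append_assoc]
  have hgetD : (com ++ List.replicate d '.' ++ r0.drop t).getD (t : Int).toNat ' ' = c := by
    rw [Int.toNat_natCast, hl, ← hpre, getD_mid]
  unfold rowStepW
  rw [hgetD]
  by_cases hO : c = 'O'
  · rw [if_neg (by simp [hO])]
    have hti : ((t : Nat) : Int) = (com.length : Int) + (d : Nat) := by push_cast [← ht]; ring
    have hrun : rowWhile (com ++ List.replicate d '.' ++ r0.drop t) m fuel (t : Int)
        = (com.length : Int) := by
      rw [hti, hdrop]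
      exact rowWhile_run com (c :: tail) d m hlast (by push_cast [← ht] at *; omega)
        fuel d (le_refl _) hfuel
    rw [hrun, Int.toNat_natCast, Int.toNat_natCast]
    have hset1 : (com ++ List.replicate d '.' ++ r0.drop t).set t '.'
        = com ++ ('.' :: (List.replicate d '.' ++ tail)) := by
      rw [hl, ← hpre, set_mid, List.append_assoc, replicate_swap]
    rw [hset1, set_mid]
    have hts : tiltStep (com, d) c = (com ++ ['O'], d) := by simp [tiltStep, hO]
    rw [hts]
    simp [emitSt, List.append_assoc]
  · rw [if_pos (by simp [hO])]
    rw [hl]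
    by_cases hdot : c = '.'
    · have hts : tiltStep (com, d) c = (com, d + 1) := by simp [tiltStep, hdot]
      rw [hts, hdot]
      simp [emitSt, List.replicate_succ', List.append_assoc]
    · have hts : tiltStep (com, d) c = (com ++ List.replicate d '.' ++ [c], 0) := by
        simp [tiltStep, hdot, hO]
      rw [hts]
      simp [emitSt, List.append_assoc]

theorem rowFold_aux (r : List Char) (m : Int) (fuel : Nat) (hm : m = (r.length : Int))
    (hf : r.length ≤ fuel) :
    ∀ t, t ≤ r.length →
      (List.range t).foldl (fun (l : List Char) (y : Nat) => rowStepW m fuel l (y : Int)) r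
        = emitSt ((r.take t).foldl tiltStep ([], 0)) ++ r.drop t := by
  intro t
  induction t with
  | zero => simp [emitSt]
  | succ t ih =>
    intro ht
    have htr : t < r.length := by omega
    rw [List.range_succ, List.foldl_append, List.foldl_cons, List.foldl_nil, ih (by omega)]
    obtain ⟨hlen, hlast⟩ := stOK_take r t (by omega)
    set st := (r.take t).foldl tiltStep ([], 0) with hst
    have hadv := rowStepW_adv r st.1 st.2 t m fuel hlen htr hm hlast (by omega)
    rw [show (st.1, st.2) = st from rfl] at hadv
    rw [show emitSt st ++ r.drop t = st.1 ++ List.replicate st.2 '.' ++ r.drop t by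
      simp [emitSt, List.append_assoc], hadv]
    rw [List.take_add_one, List.getElem?_eq_getElem htr]
    simp only [Option.toList, List.foldl_append, List.foldl_cons, List.foldl_nil]
    rw [← hst]

theorem rowFold (r : List Char) (m : Int) (fuel : Nat) (hm : m = (r.length : Int))
    (hf : r.length ≤ fuel) :
    (PySem.List.pyRange 0 m 1).foldl (rowStepW m fuel) r = tiltRun r := by
  rw [hm, PySem.List.pyRange_zero_natCast, List.foldl_map]
  rw [rowFold_aux r ((r.length : Nat) : Int) fuel rfl hf r.length (le_refl _)]
  simp [tiltRun, emitSt]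

-- ---------- the west roll on the whole grid ----------

theorem rollWhile_west (g : List (List Char)) (n m : Int) (x : Int) (hx : 0 ≤ x ∧ x < n) :
    ∀ (fuel : Nat) (cy : Int),
      rollWhile g n m 0 (-1) fuel x cy = (x, rowWhile (g.getD x.toNat []) m fuel cy) := by
  intro fuel
  induction fuel with
  | zero => intro cy; rfl
  | succ fuel ih =>
    intro cy
    rw [rollWhile, rowWhile]
    simp only [add_zero]
    rw [show cy + -1 = cy - 1 from by ring]
    by_cases hc : 0 ≤ cy - 1 ∧ cy - 1 < m ∧ (g.getD x.toNat []).getD (cy - 1).toNat ' ' = '.'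
    · rw [if_pos ⟨hx.1, hx.2, hc.1, hc.2.1, hc.2.2⟩, if_pos hc]
      exact ih (cy - 1)
    · rw [if_neg (fun h => hc ⟨h.2.2.1, h.2.2.2.1, h.2.2.2.2⟩), if_neg hc]

theorem getD_set_self (g : List (List Char)) (i : Nat) (r : List Char) (h : i < g.length) :
    (g.set i r).getD i [] = r := by
  rw [List.getD_eq_getElem?_getD, List.getElem?_set_self' ]
  simp [List.getElem?_eq_getElem h]

theorem getD_eq_getElem_row (g : List (List Char)) (i : Nat) (h : i < g.length) :
    g.getD i [] = g[i] := by
  rw [List.getD_eq_getElem?_getD, List.getElem?_eq_getElem h]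
  rfl

theorem rollStep_west (g : List (List Char)) (n m : Int) (x y : Int)
    (hx0 : 0 ≤ x) (hxn : x < n) (hn : n = (g.length : Int)) :
    rollStep n m 0 (-1) g (x, y)
      = g.set x.toNat (rowStepW m (n + m).toNat (g.getD x.toNat []) y) := by
  have hxlen : x.toNat < g.length := by omega
  have key : rollStep n m 0 (-1) g (x, y)
      = if cellGet g x y ≠ 'O' then g
        else cellSet (cellSet g x y '.') (rollWhile g n m 0 (-1) (n + m).toNat x y).1
          (rollWhile g n m 0 (-1) (n + m).toNat x y).2 'O' := rfl
  have hcg : cellGet g x y = (g.getD x.toNat []).getD y.toNat ' ' := rfl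
  rw [key, hcg]
  unfold rowStepW
  by_cases hO : (g.getD x.toNat []).getD y.toNat ' ' = 'O'
  · rw [if_neg (not_not_intro hO), if_neg (not_not_intro hO)]
    rw [rollWhile_west g n m x ⟨hx0, hxn⟩ (n + m).toNat y]
    show cellSet (cellSet g x y '.') x _ 'O' = _
    unfold cellSet
    rw [getD_set_self g x.toNat _ hxlen, List.set_set]
  · rw [if_pos hO, if_pos hO]
    rw [getD_eq_getElem_row g x.toNat hxlen, List.set_getElem_self]

theorem set_fold_shift (f : List Char → List Char) :
    ∀ (idxs : List Nat) (a : List Char) (tl : List (List Char)),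
      (idxs.map (· + 1)).foldl (fun g i => g.set i (f (g.getD i []))) (a :: tl)
        = a :: idxs.foldl (fun g i => g.set i (f (g.getD i []))) tl := by
  intro idxs
  induction idxs with
  | nil => intro a tl; rfl
  | cons i idxs ih =>
    intro a tl
    simp only [List.map_cons, List.foldl_cons, List.set_cons_succ, List.getD_cons_succ]
    exact ih a _

theorem set_fold_map (f : List Char → List Char) :
    ∀ (N : Nat) (g : List (List Char)), g.length = N →
      (List.range N).foldl (fun g i => g.set i (f (g.getD i []))) g = g.map f := by
  intro N
  induction N with
  | zero =>
    intro g hg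
    rw [List.eq_nil_of_length_eq_zero hg]
    rfl
  | succ N ih =>
    intro g hg
    cases g with
    | nil => simp at hg
    | cons a tl =>
      rw [List.range_succ_eq_map]
      simp only [List.foldl_cons, List.set_cons_zero, List.getD_cons_zero]
      have : List.map Nat.succ (List.range N) = (List.range N).map (· + 1) := by
        simp
      rw [this, set_fold_shift]
      rw [ih tl (by simpa using hg)]
      rfl

theorem inner_pass (N M : Nat) (y : Int) :
    ∀ g : List (List Char), g.length = N →
      ((PySem.List.pyRange 0 (N : Int) 1).map (fun x => (x, y))).foldl
          (rollStep (N : Int) (M : Int) 0 (-1)) g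
        = g.map (fun r => rowStepW (M : Int) (((N : Int) + (M : Int)).toNat) r y) := by
  intro g hg
  rw [List.foldl_map]
  rw [foldl_eq_inv (fun g' => g'.length = N)
    (fun g' x => rollStep (N : Int) (M : Int) 0 (-1) g' (x, y))
    (fun g' x => g'.set x.toNat (rowStepW (M : Int) (((N : Int) + (M : Int)).toNat) (g'.getD x.toNat []) y))
    (PySem.List.pyRange 0 (N : Int) 1) g hg ?_]
  · rw [PySem.List.pyRange_zero_natCast, List.foldl_map]
    have hcast : ∀ (g' : List (List Char)) (i : Nat),
        g'.set ((i : Int)).toNat (rowStepW (M : Int) (((N : Int) + (M : Int)).toNat)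
          (g'.getD ((i : Int)).toNat []) y)
        = g'.set i ((fun r => rowStepW (M : Int) (((N : Int) + (M : Int)).toNat) r y) (g'.getD i [])) := by
      intro g' i
      simp
    simp only [hcast]
    exact set_fold_map (f := fun r => rowStepW (M : Int) (((N : Int) + (M : Int)).toNat) r y) N g hg
  · intro h p hh hp
    obtain ⟨h0, hN⟩ := PySem.List.mem_pyRange_one.mp hp
    have hs := rollStep_west h (N : Int) (M : Int) p y h0 hN (by rw [hh])
    refine ⟨hs, ?_⟩
    show ((fun g' x => rollStep (N : Int) (M : Int) 0 (-1) g' (x, y)) h p).length = N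
    simp only
    rw [hs]
    simp [hh]

theorem west_core (g : List (List Char)) (M : Nat) (hr : ∀ r ∈ g, r.length = M) :
    ((PySem.List.pyRange 0 (M : Int) 1).flatMap
        (fun y => (PySem.List.pyRange 0 ((g.length : Nat) : Int) 1).map (fun x => (x, y)))).foldl
      (rollStep ((g.length : Nat) : Int) (M : Int) 0 (-1)) g = g.map tiltRun := by
  rw [List.foldl_flatMap]
  have step2 : ∀ (h : List (List Char)) (y : Int), h.length = g.length →
      ((PySem.List.pyRange 0 ((g.length : Nat) : Int) 1).map (fun x => (x, y))).foldl
        (rollStep ((g.length : Nat) : Int) (M : Int) 0 (-1)) h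
      = h.map (fun r => rowStepW (M : Int) ((((g.length : Nat) : Int) + (M : Int)).toNat) r y) :=
    fun h y hh => inner_pass g.length M y h hh
  rw [foldl_eq_inv (fun g' => g'.length = g.length) _
    (fun g' y => g'.map (fun r => rowStepW (M : Int) ((((g.length : Nat) : Int) + (M : Int)).toNat) r y))
    (PySem.List.pyRange 0 (M : Int) 1) g rfl
    (fun h y hh _ => ⟨step2 h y hh, by rw [step2 h y hh]; simp [hh]⟩)]
  rw [foldl_map_swap]
  apply List.map_congr_left
  intro r hrg
  exact rowFold r (M : Int) _ (by rw [hr r hrg]) (by simp [hr r hrg]; omega)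

-- ---------- evaluating dirDelta / dirPoints on the four literals ----------

theorem dirDelta_north : dirDelta "north" = (-1, 0) := by decide
theorem dirDelta_west : dirDelta "west" = (0, -1) := by decide
theorem dirDelta_south : dirDelta "south" = (1, 0) := by decide
theorem dirDelta_east : dirDelta "east" = (0, 1) := by decide

theorem dirPoints_north (n m : Int) : dirPoints n m "north"
    = (PySem.List.pyRange 0 n 1).flatMap (fun x => (PySem.List.pyRange 0 m 1).map (fun y => (x, y))) := by
  unfold dirPoints
  rw [if_pos rfl]

theorem dirPoints_west (n m : Int) : dirPoints n m "west"
    = (PySem.List.pyRange 0 m 1).flatMap (fun y => (PySem.List.pyRange 0 n 1).map (fun x => (x, y))) := by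
  unfold dirPoints
  rw [if_neg (by decide), if_pos rfl]

theorem dirPoints_south (n m : Int) : dirPoints n m "south"
    = (PySem.List.pyRange (n - 1) (-1) (-1)).flatMap (fun x => (PySem.List.pyRange 0 m 1).map (fun y => (x, y))) := by
  unfold dirPoints
  rw [if_neg (by decide), if_neg (by decide), if_pos rfl]

theorem dirPoints_east (n m : Int) : dirPoints n m "east"
    = (PySem.List.pyRange (m - 1) (-1) (-1)).flatMap (fun y => (PySem.List.pyRange 0 n 1).map (fun x => (x, y))) := by
  unfold dirPoints
  rw [if_neg (by decide), if_neg (by decide), if_neg (by decide)]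

theorem rollWest (g : List (List Char)) (M : Nat) (hM : (g.headD []).length = M)
    (hr : ∀ r ∈ g, r.length = M) :
    rollDirection g "west" = g.map tiltRun := by
  unfold rollDirection
  rw [dirPoints_west, dirDelta_west, hM]
  exact west_core g M hr

-- ---------- transpose conjugation: north = west on the transposed grid ----------

theorem rectM_of_shape_eq (g g' : List (List Char)) (M : Nat)
    (h : g'.map List.length = g.map List.length) (hg : ∀ r ∈ g, r.length = M) :
    ∀ r ∈ g', r.length = M := by
  intro r hr
  have : r.length ∈ g'.map List.length := List.mem_map_of_mem hr
  rw [h] at this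
  obtain ⟨r', hr', hlen⟩ := List.mem_map.1 this
  rw [← hlen, hg r' hr']

theorem length_of_shape_eq (g g' : List (List Char))
    (h : g'.map List.length = g.map List.length) : g'.length = g.length := by
  have := congrArg List.length h
  simpa using this

theorem rollWhile_bounds (g : List (List Char)) (n m dx dy : Int) :
    ∀ (fuel : Nat) (cx cy : Int), 0 ≤ cx → cx < n → 0 ≤ cy → cy < m →
      0 ≤ (rollWhile g n m dx dy fuel cx cy).1 ∧ (rollWhile g n m dx dy fuel cx cy).1 < n ∧
      0 ≤ (rollWhile g n m dx dy fuel cx cy).2 ∧ (rollWhile g n m dx dy fuel cx cy).2 < m := by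
  intro fuel
  induction fuel with
  | zero => intro cx cy h1 h2 h3 h4; exact ⟨h1, h2, h3, h4⟩
  | succ fuel ih =>
    intro cx cy h1 h2 h3 h4
    rw [rollWhile]
    split_ifs with hc
    · exact ih _ _ hc.1 hc.2.1 hc.2.2.1 hc.2.2.2.1
    · exact ⟨h1, h2, h3, h4⟩

theorem getD_trG (k : Nat) (h : List (List Char)) (i : Nat) (hi : i < k) :
    (trG k h).getD i [] = colOf h i := by
  rw [List.getD_eq_getElem?_getD]
  rw [List.getElem?_eq_getElem (by simpa [trG] using hi)]
  rw [getElem_trG k h i hi]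
  rfl

theorem cellGet_trG (g : List (List Char)) (M : Nat) (x y : Int)
    (hx0 : 0 ≤ x) (hxn : x < (g.length : Int)) (hy0 : 0 ≤ y) (hym : y < (M : Int)) :
    cellGet (trG M g) y x = cellGet g x y := by
  have hyM : y.toNat < M := by omega
  have hxl : x.toNat < g.length := by omega
  show ((trG M g).getD y.toNat []).getD x.toNat ' ' = (g.getD x.toNat []).getD y.toNat ' '
  rw [getD_trG M g y.toNat hyM, getD_colOf g y.toNat x.toNat hxl, getD_eq_getElem_row g x.toNat hxl]

theorem getD_set_eq (l : List Char) (i : Nat) (a d : Char) (h : i < l.length) :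
    (l.set i a).getD i d = a := by
  rw [List.getD_eq_getElem?_getD, List.getElem?_set_self (by exact h)]
  rfl

theorem getD_set_ne (l : List Char) (i j : Nat) (a d : Char) (h : j ≠ i) :
    (l.set i a).getD j d = l.getD j d := by
  rw [List.getD_eq_getElem?_getD, List.getElem?_set_ne (fun e => h e.symm), ← List.getD_eq_getElem?_getD]

theorem cellSet_trG (g : List (List Char)) (M : Nat) (x y : Int) (c : Char)
    (hx0 : 0 ≤ x) (hxn : x < (g.length : Int)) (hy0 : 0 ≤ y) (hym : y < (M : Int))
    (hr : ∀ r ∈ g, r.length = M) :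
    trG M (cellSet g x y c) = cellSet (trG M g) y x c := by
  have hyM : y.toNat < M := by omega
  have hxl : x.toNat < g.length := by omega
  have hrowlen : (g.getD x.toNat []).length = M := by
    rw [getD_eq_getElem_row g x.toNat hxl]
    exact hr _ (List.getElem_mem hxl)
  apply List.ext_getElem
  · simp [trG, cellSet]
  intro y' hy1 hy2
  have hy'M : y' < M := by simpa [trG] using hy1
  rw [getElem_trG M _ y' hy'M]
  show colOf (cellSet g x y c) y' = (cellSet (trG M g) y x c)[y']'hy2
  unfold cellSet colOf
  rw [List.map_set]
  by_cases he : y' = y.toNat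
  · subst he
    rw [List.getElem_set, if_pos rfl, getD_trG M g y.toNat hyM,
      getD_set_eq _ _ _ _ (by rw [hrowlen]; exact hyM)]
    rfl
  · rw [List.getElem_set, if_neg (show ¬ y.toNat = y' from fun e => he (Eq.symm e)),
      getElem_trG M g y' hy'M, getD_set_ne _ _ _ _ _ he, getD_eq_getElem_row g x.toNat hxl]
    show (colOf g y').set x.toNat (g[x.toNat].getD y' ' ') = colOf g y'
    have hval : g[x.toNat].getD y' ' ' = (colOf g y')[x.toNat]'(by simpa [colOf] using hxl) := by
      simp [colOf]
    rw [hval]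
    exact List.set_getElem_self _

theorem rollWhile_north_conj (g : List (List Char)) (M : Nat) (n m : Int)
    (hn : n = (g.length : Int)) (hm : m = (M : Int)) :
    ∀ (fuel : Nat) (cx cy : Int),
      rollWhile g n m (-1) 0 fuel cx cy
        = Prod.swap (rollWhile (trG M g) m n 0 (-1) fuel cy cx) := by
  intro fuel
  induction fuel with
  | zero => intro cx cy; rfl
  | succ fuel ih =>
    intro cx cy
    rw [rollWhile, rollWhile]
    simp only [add_zero]
    rw [show cx + -1 = cx - 1 from by ring]
    by_cases hc : 0 ≤ cx - 1 ∧ cx - 1 < n ∧ 0 ≤ cy ∧ cy < m ∧ cellGet g (cx - 1) cy = '.'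
    · rw [if_pos hc,
        if_pos (⟨hc.2.2.1, hc.2.2.2.1, hc.1, hc.2.1, by
          rw [cellGet_trG g M (cx - 1) cy (by omega) (by omega) (by omega) (by omega)]
          exact hc.2.2.2.2⟩ : 0 ≤ cy ∧ cy < m ∧ 0 ≤ cx - 1 ∧ cx - 1 < n ∧ cellGet (trG M g) cy (cx - 1) = '.')]
      exact ih (cx - 1) cy
    · rw [if_neg hc, if_neg]
      · rfl
      · intro h
        apply hc
        refine ⟨h.2.2.1, h.2.2.2.1, h.1, h.2.1, ?_⟩
        rw [← cellGet_trG g M (cx - 1) cy (by omega) (by omega) (by omega) (by omega)]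
        exact h.2.2.2.2

theorem rollStep_north_conj (g : List (List Char)) (M : Nat) (x y : Int)
    (hx0 : 0 ≤ x) (hxn : x < (g.length : Int)) (hy0 : 0 ≤ y) (hym : y < (M : Int))
    (hr : ∀ r ∈ g, r.length = M) :
    trG M (rollStep (g.length : Int) (M : Int) (-1) 0 g (x, y))
      = rollStep (M : Int) (g.length : Int) 0 (-1) (trG M g) (y, x) := by
  have keyL : rollStep (g.length : Int) (M : Int) (-1) 0 g (x, y)
      = if cellGet g x y ≠ 'O' then g
        else cellSet (cellSet g x y '.')
          (rollWhile g (g.length : Int) (M : Int) (-1) 0 ((g.length : Int) + (M : Int)).toNat x y).1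
          (rollWhile g (g.length : Int) (M : Int) (-1) 0 ((g.length : Int) + (M : Int)).toNat x y).2 'O' := rfl
  have keyR : rollStep (M : Int) (g.length : Int) 0 (-1) (trG M g) (y, x)
      = if cellGet (trG M g) y x ≠ 'O' then trG M g
        else cellSet (cellSet (trG M g) y x '.')
          (rollWhile (trG M g) (M : Int) (g.length : Int) 0 (-1) ((M : Int) + (g.length : Int)).toNat y x).1
          (rollWhile (trG M g) (M : Int) (g.length : Int) 0 (-1) ((M : Int) + (g.length : Int)).toNat y x).2 'O' := rfl
  rw [keyL, keyR, cellGet_trG g M x y hx0 hxn hy0 hym,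
    show ((M : Int) + (g.length : Int)).toNat = ((g.length : Int) + (M : Int)).toNat by rw [Int.add_comm]]
  by_cases hO : cellGet g x y = 'O'
  · rw [if_neg (not_not_intro hO), if_neg (not_not_intro hO)]
    have hw := rollWhile_north_conj g M (g.length : Int) (M : Int) rfl rfl
      ((g.length : Int) + (M : Int)).toNat x y
    set w := rollWhile (trG M g) (M : Int) (g.length : Int) 0 (-1)
      ((g.length : Int) + (M : Int)).toNat y x with hwdef
    have hb := rollWhile_bounds (trG M g) (M : Int) (g.length : Int) 0 (-1)
      ((g.length : Int) + (M : Int)).toNat y x hy0 hym hx0 hxn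
    rw [hw]
    have hshape := shape_cellSet g x y '.'
    have hlen1 : ((cellSet g x y '.').length : Int) = (g.length : Int) := by
      rw [length_of_shape_eq _ _ hshape]
    have hrect1 : ∀ r ∈ cellSet g x y '.', r.length = M := rectM_of_shape_eq g _ M hshape hr
    have hc2 := cellSet_trG (cellSet g x y '.') M w.2 w.1 'O' hb.2.2.1
      (by rw [hlen1]; exact hb.2.2.2) hb.1 hb.2.1 hrect1
    show trG M (cellSet (cellSet g x y '.') w.2 w.1 'O') = _
    rw [hc2, cellSet_trG g M x y '.' hx0 hxn hy0 hym hr]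
  · rw [if_pos hO, if_pos hO]

theorem map_swap_pts (n m : Int) :
    ((PySem.List.pyRange 0 n 1).flatMap
        (fun x => (PySem.List.pyRange 0 m 1).map (fun y => (x, y)))).map Prod.swap
      = (PySem.List.pyRange 0 n 1).flatMap
          (fun y => (PySem.List.pyRange 0 m 1).map (fun x => (x, y))) := by
  rw [List.map_flatMap]
  simp [List.map_map, Function.comp_def]

theorem northFold_eq (g : List (List Char)) (M : Nat) (hr : ∀ r ∈ g, r.length = M) :
    ((PySem.List.pyRange 0 (g.length : Int) 1).flatMap
        (fun x => (PySem.List.pyRange 0 (M : Int) 1).map (fun y => (x, y)))).foldl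
      (rollStep (g.length : Int) (M : Int) (-1) 0) g
      = trG g.length ((trG M g).map tiltRun) := by
  have hTlen : (trG M g).length = M := by simp [trG]
  have hprem : ∀ (h : List (List Char)) (p : Int × Int), h.map List.length = g.map List.length →
      p ∈ (PySem.List.pyRange 0 (g.length : Int) 1).flatMap
        (fun x => (PySem.List.pyRange 0 (M : Int) 1).map (fun y => (x, y))) →
      trG M (rollStep (g.length : Int) (M : Int) (-1) 0 h p)
        = rollStep (M : Int) (g.length : Int) 0 (-1) (trG M h) (Prod.swap p) ∧
      (rollStep (g.length : Int) (M : Int) (-1) 0 h p).map List.length = g.map List.length := by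
    intro h p hInv hp
    obtain ⟨x, hx, hp2⟩ := List.mem_flatMap.1 hp
    obtain ⟨y, hy, rfl⟩ := List.mem_map.1 hp2
    obtain ⟨hx0, hxn⟩ := PySem.List.mem_pyRange_one.mp hx
    obtain ⟨hy0, hym⟩ := PySem.List.mem_pyRange_one.mp hy
    have hhlen : h.length = g.length := length_of_shape_eq g h hInv
    have hhrect : ∀ r ∈ h, r.length = M := rectM_of_shape_eq g h M hInv hr
    constructor
    · have := rollStep_north_conj h M x y hx0 (by rw [hhlen]; exact hxn) hy0 hym hhrect
      rw [show Prod.swap (x, y) = (y, x) from rfl, ← hhlen]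
      exact this
    · rw [shape_rollStep]
      exact hInv
  have hconj := foldl_conj (trG M) Prod.swap
    (rollStep (g.length : Int) (M : Int) (-1) 0)
    (rollStep (M : Int) (g.length : Int) 0 (-1))
    (fun g' => g'.map List.length = g.map List.length)
    ((PySem.List.pyRange 0 (g.length : Int) 1).flatMap
      (fun x => (PySem.List.pyRange 0 (M : Int) 1).map (fun y => (x, y)))) g rfl hprem
  have hshape := shape_foldl _ (fun g' p => shape_rollStep (g.length : Int) (M : Int) (-1) 0 g' p)
    ((PySem.List.pyRange 0 (g.length : Int) 1).flatMap
      (fun x => (PySem.List.pyRange 0 (M : Int) 1).map (fun y => (x, y)))) g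
  have hlen := length_of_shape_eq g _ hshape
  have hrect := rectM_of_shape_eq g _ M hshape hr
  set res := ((PySem.List.pyRange 0 (g.length : Int) 1).flatMap
      (fun x => (PySem.List.pyRange 0 (M : Int) 1).map (fun y => (x, y)))).foldl
    (rollStep (g.length : Int) (M : Int) (-1) 0) g with hres
  have h1 : res = trG res.length (trG M res) := (trG_trG res M hrect).symm
  rw [h1, hlen, hconj, map_swap_pts]
  congr 1
  have hw := west_core (trG M g) g.length (fun r hrr => by
    obtain ⟨y', hy', rfl⟩ := List.mem_map.1 hrr
    simp [colOf])
  rw [hTlen] at hw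
  exact hw

theorem rollNorth (g : List (List Char)) (M : Nat) (hM : (g.headD []).length = M)
    (hr : ∀ r ∈ g, r.length = M) :
    rollDirection g "north" = trG g.length ((trG M g).map tiltRun) := by
  unfold rollDirection
  rw [dirPoints_north, dirDelta_north, hM]
  exact northFold_eq g M hr

-- ---------- vertical-flip conjugation: south = north on the reversed grid ----------

theorem reverse_set {α : Type} (l : List α) (i : Nat) (a : α) (h : i < l.length) :
    (l.set i a).reverse = l.reverse.set (l.length - 1 - i) a := by
  apply List.ext_getElem (by simp)
  intro j h1 h2
  have hj : j < l.length := by simpa using h2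
  simp only [List.getElem_reverse, List.getElem_set, List.length_set]
  have hiff : (i = l.length - 1 - j) ↔ (l.length - 1 - i = j) := by omega
  split_ifs with e1 e2 e2
  · rfl
  · exact absurd (hiff.1 e1) e2
  · exact absurd (hiff.2 e2) e1
  · rfl

theorem getD_reverse (g : List (List Char)) (i : Nat) (hi : i < g.length) :
    g.reverse.getD i [] = g.getD (g.length - 1 - i) [] := by
  rw [getD_eq_getElem_row _ i (by simpa using hi), getD_eq_getElem_row _ _ (by omega),
    List.getElem_reverse]

theorem cellGet_vflip (g : List (List Char)) (x y : Int)
    (hx0 : 0 ≤ x) (hxn : x < (g.length : Int)) :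
    cellGet g.reverse x y = cellGet g ((g.length : Int) - 1 - x) y := by
  show (g.reverse.getD x.toNat []).getD y.toNat ' ' = (g.getD ((g.length : Int) - 1 - x).toNat []).getD y.toNat ' '
  rw [getD_reverse g x.toNat (by omega), show ((g.length : Int) - 1 - x).toNat = g.length - 1 - x.toNat by omega]

theorem cellSet_vflip (g : List (List Char)) (x y : Int) (c : Char)
    (hx0 : 0 ≤ x) (hxn : x < (g.length : Int)) :
    (cellSet g ((g.length : Int) - 1 - x) y c).reverse = cellSet g.reverse x y c := by
  unfold cellSet
  rw [show ((g.length : Int) - 1 - x).toNat = g.length - 1 - x.toNat by omega,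
    reverse_set _ _ _ (by omega), getD_reverse g x.toNat (by omega),
    show g.length - 1 - (g.length - 1 - x.toNat) = x.toNat by omega]

theorem rollWhile_south_conj (g : List (List Char)) (m : Int) :
    ∀ (fuel : Nat) (cx cy : Int), 0 ≤ cx → cx < (g.length : Int) →
      rollWhile g (g.length : Int) m 1 0 fuel cx cy
        = ((g.length : Int) - 1 - (rollWhile g.reverse (g.length : Int) m (-1) 0 fuel ((g.length : Int) - 1 - cx) cy).1,
           (rollWhile g.reverse (g.length : Int) m (-1) 0 fuel ((g.length : Int) - 1 - cx) cy).2) := by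
  intro fuel
  induction fuel with
  | zero =>
    intro cx cy h0 h1
    show (cx, cy) = ((g.length : Int) - 1 - ((g.length : Int) - 1 - cx), cy)
    rw [show (g.length : Int) - 1 - ((g.length : Int) - 1 - cx) = cx by omega]
  | succ fuel ih =>
    intro cx cy h0 h1
    rw [rollWhile, rollWhile]
    simp only [add_zero]
    rw [show (g.length : Int) - 1 - cx + -1 = (g.length : Int) - 1 - (cx + 1) by ring]
    by_cases hc : 0 ≤ cx + 1 ∧ cx + 1 < (g.length : Int) ∧ 0 ≤ cy ∧ cy < m ∧ cellGet g (cx + 1) cy = '.'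
    · have hcell : cellGet g.reverse ((g.length : Int) - 1 - (cx + 1)) cy = cellGet g (cx + 1) cy := by
        rw [cellGet_vflip g ((g.length : Int) - 1 - (cx + 1)) cy (by omega) (by omega),
          show (g.length : Int) - 1 - ((g.length : Int) - 1 - (cx + 1)) = cx + 1 by omega]
      rw [if_pos hc, if_pos (⟨by omega, by omega, hc.2.2.1, hc.2.2.2.1, by rw [hcell]; exact hc.2.2.2.2⟩ :
        0 ≤ (g.length : Int) - 1 - (cx + 1) ∧ (g.length : Int) - 1 - (cx + 1) < (g.length : Int) ∧
        0 ≤ cy ∧ cy < m ∧ cellGet g.reverse ((g.length : Int) - 1 - (cx + 1)) cy = '.')]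
      exact ih (cx + 1) cy (by omega) hc.2.1
    · rw [if_neg hc, if_neg]
      · show (cx, cy) = ((g.length : Int) - 1 - ((g.length : Int) - 1 - cx), cy)
        rw [show (g.length : Int) - 1 - ((g.length : Int) - 1 - cx) = cx by omega]
      · intro h
        apply hc
        have hb : cx + 1 < (g.length : Int) := by have := h.1; omega
        refine ⟨by omega, hb, h.2.2.1, h.2.2.2.1, ?_⟩
        have hcell : cellGet g.reverse ((g.length : Int) - 1 - (cx + 1)) cy = cellGet g (cx + 1) cy := by
          rw [cellGet_vflip g ((g.length : Int) - 1 - (cx + 1)) cy (by omega) (by omega),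
            show (g.length : Int) - 1 - ((g.length : Int) - 1 - (cx + 1)) = cx + 1 by omega]
        rw [← hcell]
        exact h.2.2.2.2

theorem trG_vflip (M : Nat) (g : List (List Char)) :
    trG M g.reverse = (trG M g).map List.reverse := by
  unfold trG colOf
  rw [List.map_map]
  apply List.map_congr_left
  intro y _
  simp [List.map_reverse]

theorem rollStep_south_conj (g : List (List Char)) (m : Int) (x y : Int)
    (hx0 : 0 ≤ x) (hxn : x < (g.length : Int)) (hy0 : 0 ≤ y) (hym : y < m) :
    (rollStep (g.length : Int) m 1 0 g (x, y)).reverse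
      = rollStep (g.length : Int) m (-1) 0 g.reverse ((g.length : Int) - 1 - x, y) := by
  have keyL : rollStep (g.length : Int) m 1 0 g (x, y)
      = if cellGet g x y ≠ 'O' then g
        else cellSet (cellSet g x y '.')
          (rollWhile g (g.length : Int) m 1 0 ((g.length : Int) + m).toNat x y).1
          (rollWhile g (g.length : Int) m 1 0 ((g.length : Int) + m).toNat x y).2 'O' := rfl
  have keyR : rollStep (g.length : Int) m (-1) 0 g.reverse ((g.length : Int) - 1 - x, y)
      = if cellGet g.reverse ((g.length : Int) - 1 - x) y ≠ 'O' then g.reverse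
        else cellSet (cellSet g.reverse ((g.length : Int) - 1 - x) y '.')
          (rollWhile g.reverse (g.length : Int) m (-1) 0 ((g.length : Int) + m).toNat ((g.length : Int) - 1 - x) y).1
          (rollWhile g.reverse (g.length : Int) m (-1) 0 ((g.length : Int) + m).toNat ((g.length : Int) - 1 - x) y).2 'O' := rfl
  have hcell : cellGet g.reverse ((g.length : Int) - 1 - x) y = cellGet g x y := by
    rw [cellGet_vflip g ((g.length : Int) - 1 - x) y (by omega) (by omega),
      show (g.length : Int) - 1 - ((g.length : Int) - 1 - x) = x by omega]
  rw [keyL, keyR, hcell]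
  by_cases hO : cellGet g x y = 'O'
  · rw [if_neg (not_not_intro hO), if_neg (not_not_intro hO)]
    have hw := rollWhile_south_conj g m ((g.length : Int) + m).toNat x y hx0 hxn
    set w := rollWhile g.reverse (g.length : Int) m (-1) 0 ((g.length : Int) + m).toNat
      ((g.length : Int) - 1 - x) y with hwdef
    have hb := rollWhile_bounds g.reverse (g.length : Int) m (-1) 0
      ((g.length : Int) + m).toNat ((g.length : Int) - 1 - x) y (by omega) (by omega) hy0 hym
    rw [hw]
    show (cellSet (cellSet g x y '.') ((g.length : Int) - 1 - w.1) w.2 'O').reverse = _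
    have hshape := shape_cellSet g x y '.'
    have hlen1 : (cellSet g x y '.').length = g.length := length_of_shape_eq _ _ hshape
    have hc2 : (cellSet (cellSet g x y '.') ((g.length : Int) - 1 - w.1) w.2 'O').reverse
        = cellSet (cellSet g x y '.').reverse w.1 w.2 'O' := by
      have := cellSet_vflip (cellSet g x y '.') w.1 w.2 'O' hb.1 (by rw [hlen1]; exact hb.2.1)
      rw [hlen1] at this
      exact this
    rw [hc2]
    have hc1 : (cellSet g x y '.').reverse = cellSet g.reverse ((g.length : Int) - 1 - x) y '.' := by
      have := cellSet_vflip g ((g.length : Int) - 1 - x) y '.' (by omega) (by omega)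
      rw [show (g.length : Int) - 1 - ((g.length : Int) - 1 - x) = x by omega] at this
      exact this
    rw [hc1]
  · rw [if_pos hO, if_pos hO]

theorem pyRange_zero_eq (n : Int) (hn : 0 ≤ n) :
    PySem.List.pyRange 0 n 1 = (List.range n.toNat).map (fun (k : Nat) => (k : Int)) := by
  conv_lhs => rw [show n = ((n.toNat : Nat) : Int) by omega]
  exact PySem.List.pyRange_zero_natCast n.toNat

theorem southPts_eq (n m : Int) (hn : 0 ≤ n) :
    (PySem.List.pyRange (n - 1) (-1) (-1)).flatMap
      (fun x => (PySem.List.pyRange 0 m 1).map (fun y => (x, y)))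
    = ((PySem.List.pyRange 0 n 1).flatMap
        (fun x => (PySem.List.pyRange 0 m 1).map (fun y => (x, y)))).map
      (fun p => (n - 1 - p.1, p.2)) := by
  rw [PySem.List.pyRange_neg_one, show (n - 1 - (-1)).toNat = n.toNat by omega,
    pyRange_zero_eq n hn, List.map_flatMap, List.flatMap_map, List.flatMap_map]
  congr 1
  funext k
  simp [List.map_map]

theorem rollSouth (g : List (List Char)) (M : Nat) (hM : (g.headD []).length = M)
    (hr : ∀ r ∈ g, r.length = M) :
    rollDirection g "south" = (trG g.length (((trG M g).map List.reverse).map tiltRun)).reverse := by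
  unfold rollDirection
  rw [dirPoints_south, dirDelta_south, hM]
  rw [southPts_eq (g.length : Int) (M : Int) (by omega)]
  dsimp only
  rw [List.foldl_map]
  have hprem : ∀ (h : List (List Char)) (p : Int × Int), h.map List.length = g.map List.length →
      p ∈ (PySem.List.pyRange 0 (g.length : Int) 1).flatMap
        (fun x => (PySem.List.pyRange 0 (M : Int) 1).map (fun y => (x, y))) →
      (rollStep (g.length : Int) (M : Int) 1 0 h ((g.length : Int) - 1 - p.1, p.2)).reverse
        = rollStep (g.length : Int) (M : Int) (-1) 0 h.reverse (id p) ∧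
      (rollStep (g.length : Int) (M : Int) 1 0 h ((g.length : Int) - 1 - p.1, p.2)).map List.length
        = g.map List.length := by
    intro h p hInv hp
    obtain ⟨x, hx, hp2⟩ := List.mem_flatMap.1 hp
    obtain ⟨y, hy, rfl⟩ := List.mem_map.1 hp2
    obtain ⟨hx0, hxn⟩ := PySem.List.mem_pyRange_one.mp hx
    obtain ⟨hy0, hym⟩ := PySem.List.mem_pyRange_one.mp hy
    have hhlen : h.length = g.length := length_of_shape_eq g h hInv
    constructor
    · have := rollStep_south_conj h (M : Int) ((g.length : Int) - 1 - x) y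
        (by omega) (by omega) hy0 hym
      rw [hhlen, show (g.length : Int) - 1 - ((g.length : Int) - 1 - x) = x from by omega] at this
      exact this
    · rw [shape_rollStep]; exact hInv
  have hconj := foldl_conj List.reverse id
    (fun h (p : Int × Int) => rollStep (g.length : Int) (M : Int) 1 0 h ((g.length : Int) - 1 - p.1, p.2))
    (rollStep (g.length : Int) (M : Int) (-1) 0)
    (fun g' => g'.map List.length = g.map List.length)
    ((PySem.List.pyRange 0 (g.length : Int) 1).flatMap
      (fun x => (PySem.List.pyRange 0 (M : Int) 1).map (fun y => (x, y)))) g rfl hprem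
  rw [List.map_id] at hconj
  rw [← List.reverse_reverse (List.foldl _ g _), hconj]
  have hnf := northFold_eq g.reverse M (by intro r hrr; exact hr r (List.mem_reverse.1 hrr))
  rw [List.length_reverse] at hnf
  rw [hnf]
  congr 2
  rw [trG_vflip]

-- ---------- horizontal-flip conjugation: east = west on the row-reversed grid ----------

theorem getD_map_reverse (g : List (List Char)) (i : Nat) (hi : i < g.length) :
    (g.map List.reverse).getD i [] = (g.getD i []).reverse := by
  rw [getD_eq_getElem_row _ i (by simpa using hi), getD_eq_getElem_row g i hi, List.getElem_map]

theorem rowlen (g : List (List Char)) (M : Nat) (hr : ∀ r ∈ g, r.length = M) (i : Nat)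
    (hi : i < g.length) : (g.getD i []).length = M := by
  rw [getD_eq_getElem_row g i hi]
  exact hr _ (List.getElem_mem hi)

theorem cellGet_hflip (g : List (List Char)) (M : Nat) (x y : Int)
    (hx0 : 0 ≤ x) (hxn : x < (g.length : Int)) (hy0 : 0 ≤ y) (hym : y < (M : Int))
    (hr : ∀ r ∈ g, r.length = M) :
    cellGet (g.map List.reverse) x y = cellGet g x ((M : Int) - 1 - y) := by
  show ((g.map List.reverse).getD x.toNat []).getD y.toNat ' '
      = (g.getD x.toNat []).getD ((M : Int) - 1 - y).toNat ' '
  rw [getD_map_reverse g x.toNat (by omega)]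
  have hrl := rowlen g M hr x.toNat (by omega)
  set row := g.getD x.toNat [] with hrow
  have hy' : y.toNat < row.length := by omega
  rw [List.getD_eq_getElem?_getD,
    List.getElem?_eq_getElem (show y.toNat < row.reverse.length by
      rw [List.length_reverse]; exact hy'),
    List.getElem_reverse]
  rw [List.getD_eq_getElem?_getD,
    List.getElem?_eq_getElem (show ((M : Int) - 1 - y).toNat < row.length by omega)]
  simp only [Option.getD_some]
  congr 1
  omega

theorem cellSet_hflip (g : List (List Char)) (M : Nat) (x y : Int) (c : Char)
    (hx0 : 0 ≤ x) (hxn : x < (g.length : Int)) (hy0 : 0 ≤ y) (hym : y < (M : Int))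
    (hr : ∀ r ∈ g, r.length = M) :
    (cellSet g x ((M : Int) - 1 - y) c).map List.reverse = cellSet (g.map List.reverse) x y c := by
  have hrl : (g.getD x.toNat []).length = M := rowlen g M hr x.toNat (by omega)
  unfold cellSet
  rw [List.map_set, getD_map_reverse g x.toNat (by omega),
    reverse_set _ _ _ (show ((M : Int) - 1 - y).toNat < (g.getD x.toNat []).length by rw [hrl]; omega),
    show (g.getD x.toNat []).length - 1 - ((M : Int) - 1 - y).toNat = y.toNat by rw [hrl]; omega]

theorem rollWhile_east_conj (g : List (List Char)) (M : Nat)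
    (hr : ∀ r ∈ g, r.length = M) :
    ∀ (fuel : Nat) (cx cy : Int), 0 ≤ cx → cx < (g.length : Int) →
      rollWhile g (g.length : Int) (M : Int) 0 1 fuel cx cy
        = ((rollWhile (g.map List.reverse) (g.length : Int) (M : Int) 0 (-1) fuel cx ((M : Int) - 1 - cy)).1,
           (M : Int) - 1 - (rollWhile (g.map List.reverse) (g.length : Int) (M : Int) 0 (-1) fuel cx ((M : Int) - 1 - cy)).2) := by
  intro fuel
  induction fuel with
  | zero =>
    intro cx cy h0 h1
    show (cx, cy) = (cx, (M : Int) - 1 - ((M : Int) - 1 - cy))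
    rw [show (M : Int) - 1 - ((M : Int) - 1 - cy) = cy by omega]
  | succ fuel ih =>
    intro cx cy h0 h1
    rw [rollWhile, rollWhile]
    simp only [add_zero]
    rw [show (M : Int) - 1 - cy + -1 = (M : Int) - 1 - (cy + 1) by ring]
    by_cases hc : 0 ≤ cx ∧ cx < (g.length : Int) ∧ 0 ≤ cy + 1 ∧ cy + 1 < (M : Int) ∧ cellGet g cx (cy + 1) = '.'
    · have hcell : cellGet (g.map List.reverse) cx ((M : Int) - 1 - (cy + 1)) = cellGet g cx (cy + 1) := by
        rw [cellGet_hflip g M cx ((M : Int) - 1 - (cy + 1)) h0 h1 (by omega) (by omega) hr,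
          show (M : Int) - 1 - ((M : Int) - 1 - (cy + 1)) = cy + 1 by omega]
      rw [if_pos hc, if_pos (⟨h0, h1, by omega, by omega, by rw [hcell]; exact hc.2.2.2.2⟩ :
        0 ≤ cx ∧ cx < (g.length : Int) ∧ 0 ≤ (M : Int) - 1 - (cy + 1) ∧ (M : Int) - 1 - (cy + 1) < (M : Int) ∧
        cellGet (g.map List.reverse) cx ((M : Int) - 1 - (cy + 1)) = '.')]
      exact ih cx (cy + 1) h0 h1
    · rw [if_neg hc, if_neg]
      · show (cx, cy) = (cx, (M : Int) - 1 - ((M : Int) - 1 - cy))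
        rw [show (M : Int) - 1 - ((M : Int) - 1 - cy) = cy by omega]
      · intro h
        apply hc
        have hb1 : cy + 1 < (M : Int) := by have := h.2.2.1; omega
        have hb0 : 0 ≤ cy + 1 := by have := h.2.2.2.1; omega
        refine ⟨h0, h1, hb0, hb1, ?_⟩
        have hcell : cellGet (g.map List.reverse) cx ((M : Int) - 1 - (cy + 1)) = cellGet g cx (cy + 1) := by
          rw [cellGet_hflip g M cx ((M : Int) - 1 - (cy + 1)) h0 h1 (by omega) (by omega) hr,
            show (M : Int) - 1 - ((M : Int) - 1 - (cy + 1)) = cy + 1 by omega]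
        rw [← hcell]
        exact h.2.2.2.2

theorem rollStep_east_conj (g : List (List Char)) (M : Nat) (x y : Int)
    (hx0 : 0 ≤ x) (hxn : x < (g.length : Int)) (hy0 : 0 ≤ y) (hym : y < (M : Int))
    (hr : ∀ r ∈ g, r.length = M) :
    (rollStep (g.length : Int) (M : Int) 0 1 g (x, y)).map List.reverse
      = rollStep (g.length : Int) (M : Int) 0 (-1) (g.map List.reverse) (x, (M : Int) - 1 - y) := by
  have keyL : rollStep (g.length : Int) (M : Int) 0 1 g (x, y)
      = if cellGet g x y ≠ 'O' then g
        else cellSet (cellSet g x y '.')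
          (rollWhile g (g.length : Int) (M : Int) 0 1 ((g.length : Int) + (M : Int)).toNat x y).1
          (rollWhile g (g.length : Int) (M : Int) 0 1 ((g.length : Int) + (M : Int)).toNat x y).2 'O' := rfl
  have keyR : rollStep (g.length : Int) (M : Int) 0 (-1) (g.map List.reverse) (x, (M : Int) - 1 - y)
      = if cellGet (g.map List.reverse) x ((M : Int) - 1 - y) ≠ 'O' then g.map List.reverse
        else cellSet (cellSet (g.map List.reverse) x ((M : Int) - 1 - y) '.')
          (rollWhile (g.map List.reverse) (g.length : Int) (M : Int) 0 (-1) ((g.length : Int) + (M : Int)).toNat x ((M : Int) - 1 - y)).1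
          (rollWhile (g.map List.reverse) (g.length : Int) (M : Int) 0 (-1) ((g.length : Int) + (M : Int)).toNat x ((M : Int) - 1 - y)).2 'O' := rfl
  have hcell : cellGet (g.map List.reverse) x ((M : Int) - 1 - y) = cellGet g x y := by
    rw [cellGet_hflip g M x ((M : Int) - 1 - y) hx0 hxn (by omega) (by omega) hr,
      show (M : Int) - 1 - ((M : Int) - 1 - y) = y by omega]
  rw [keyL, keyR, hcell]
  by_cases hO : cellGet g x y = 'O'
  · rw [if_neg (not_not_intro hO), if_neg (not_not_intro hO)]
    have hw := rollWhile_east_conj g M hr ((g.length : Int) + (M : Int)).toNat x y hx0 hxn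
    set w := rollWhile (g.map List.reverse) (g.length : Int) (M : Int) 0 (-1)
      ((g.length : Int) + (M : Int)).toNat x ((M : Int) - 1 - y) with hwdef
    have hb := rollWhile_bounds (g.map List.reverse) (g.length : Int) (M : Int) 0 (-1)
      ((g.length : Int) + (M : Int)).toNat x ((M : Int) - 1 - y) hx0 (by simpa using hxn) (by omega) (by omega)
    rw [hw]
    show (cellSet (cellSet g x y '.') w.1 ((M : Int) - 1 - w.2) 'O').map List.reverse = _
    have hshape := shape_cellSet g x y '.'
    have hlen1 : (cellSet g x y '.').length = g.length := length_of_shape_eq _ _ hshape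
    have hrect1 : ∀ r ∈ cellSet g x y '.', r.length = M := rectM_of_shape_eq g _ M hshape hr
    have hc2 : (cellSet (cellSet g x y '.') w.1 ((M : Int) - 1 - w.2) 'O').map List.reverse
        = cellSet ((cellSet g x y '.').map List.reverse) w.1 w.2 'O' := by
      exact cellSet_hflip (cellSet g x y '.') M w.1 w.2 'O' hb.1
        (by rw [hlen1]; exact (by simpa using hb.2.1)) hb.2.2.1 hb.2.2.2 hrect1
    rw [hc2]
    have hc1 : (cellSet g x y '.').map List.reverse
        = cellSet (g.map List.reverse) x ((M : Int) - 1 - y) '.' := by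
      have := cellSet_hflip g M x ((M : Int) - 1 - y) '.' hx0 hxn (by omega) (by omega) hr
      rw [show (M : Int) - 1 - ((M : Int) - 1 - y) = y by omega] at this
      exact this
    rw [hc1]
  · rw [if_pos hO, if_pos hO]

theorem eastPts_eq (n m : Int) (hm : 0 ≤ m) :
    (PySem.List.pyRange (m - 1) (-1) (-1)).flatMap
      (fun y => (PySem.List.pyRange 0 n 1).map (fun x => (x, y)))
    = ((PySem.List.pyRange 0 m 1).flatMap
        (fun y => (PySem.List.pyRange 0 n 1).map (fun x => (x, y)))).map
      (fun p => (p.1, m - 1 - p.2)) := by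
  rw [PySem.List.pyRange_neg_one, show (m - 1 - (-1)).toNat = m.toNat by omega,
    pyRange_zero_eq m hm, List.map_flatMap, List.flatMap_map, List.flatMap_map]
  congr 1
  funext k
  simp [List.map_map]

theorem rollEast (g : List (List Char)) (M : Nat) (hM : (g.headD []).length = M)
    (hr : ∀ r ∈ g, r.length = M) :
    rollDirection g "east" = ((g.map List.reverse).map tiltRun).map List.reverse := by
  unfold rollDirection
  rw [dirPoints_east, dirDelta_east, hM]
  rw [eastPts_eq (g.length : Int) (M : Int) (by omega)]
  dsimp only
  rw [List.foldl_map]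
  have hprem : ∀ (h : List (List Char)) (p : Int × Int), h.map List.length = g.map List.length →
      p ∈ (PySem.List.pyRange 0 (M : Int) 1).flatMap
        (fun y => (PySem.List.pyRange 0 (g.length : Int) 1).map (fun x => (x, y))) →
      (rollStep (g.length : Int) (M : Int) 0 1 h (p.1, (M : Int) - 1 - p.2)).map List.reverse
        = rollStep (g.length : Int) (M : Int) 0 (-1) (h.map List.reverse) (id p) ∧
      (rollStep (g.length : Int) (M : Int) 0 1 h (p.1, (M : Int) - 1 - p.2)).map List.length
        = g.map List.length := by
    intro h p hInv hp
    obtain ⟨y, hy, hp2⟩ := List.mem_flatMap.1 hp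
    obtain ⟨x, hx, rfl⟩ := List.mem_map.1 hp2
    obtain ⟨hy0, hym⟩ := PySem.List.mem_pyRange_one.mp hy
    obtain ⟨hx0, hxn⟩ := PySem.List.mem_pyRange_one.mp hx
    have hhlen : h.length = g.length := length_of_shape_eq g h hInv
    have hhrect : ∀ r ∈ h, r.length = M := rectM_of_shape_eq g h M hInv hr
    constructor
    · have := rollStep_east_conj h M x ((M : Int) - 1 - y)
        hx0 (by omega) (by omega) (by omega) hhrect
      rw [hhlen, show (M : Int) - 1 - ((M : Int) - 1 - y) = y from by omega] at this
      exact this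
    · rw [shape_rollStep]; exact hInv
  have hconj := foldl_conj (fun h : List (List Char) => h.map List.reverse) id
    (fun h (p : Int × Int) => rollStep (g.length : Int) (M : Int) 0 1 h (p.1, (M : Int) - 1 - p.2))
    (rollStep (g.length : Int) (M : Int) 0 (-1))
    (fun g' => g'.map List.length = g.map List.length)
    ((PySem.List.pyRange 0 (M : Int) 1).flatMap
      (fun y => (PySem.List.pyRange 0 (g.length : Int) 1).map (fun x => (x, y)))) g rfl hprem
  rw [List.map_id] at hconj
  have hdouble : ∀ h : List (List Char), (h.map List.reverse).map List.reverse = h := by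
    intro h
    rw [List.map_map]
    simp
  dsimp only at hconj
  rw [← hdouble (List.foldl _ g _), hconj]
  congr 1
  have hw := west_core (g.map List.reverse) M (by
    intro r hrr
    obtain ⟨r', hr', rfl⟩ := List.mem_map.1 hrr
    rw [List.length_reverse]
    exact hr r' hr')
  rw [List.length_map] at hw
  exact hw

-- ---------- assembling one full spin ----------

theorem headLen_of_shape_eq (g g' : List (List Char))
    (h : g'.map List.length = g.map List.length) : (g'.headD []).length = (g.headD []).length := by
  cases g' with
  | nil => cases g with
    | nil => rfl
    | cons a l => simp at h
  | cons a l => cases g with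
    | nil => simp at h
    | cons b l' => simp at h; simp [h.1]

theorem length_tiltRun (l : List Char) : (tiltRun l).length = l.length := by
  obtain ⟨hlen, _⟩ := stOK_take l l.length (le_refl _)
  rw [List.take_length] at hlen
  unfold tiltRun
  simp [hlen]

theorem reverse_range_map (n : Nat) :
    (List.range n).reverse = (List.range n).map (fun k => n - 1 - k) := by
  apply List.ext_getElem (by simp)
  intro i h1 h2
  simp [List.getElem_reverse]

theorem rebuild_eq_trG (cols : List (List Char)) (n m : Nat) (hc : cols.length = m) :
    (List.range n).map (fun x => (List.range m).map (fun y => (cols.getD y []).getD x ' '))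
      = trG n cols := by
  unfold trG colOf
  apply List.map_congr_left
  intro x _
  exact map_getD_of_length cols m hc (f := fun r => r.getD x ' ')

theorem rebuild_rev_eq (cols : List (List Char)) (n m : Nat) (hc : cols.length = m) :
    (List.range n).map (fun x => (List.range m).map (fun y => (cols.getD y []).getD (n - 1 - x) ' '))
      = (trG n cols).reverse := by
  unfold trG
  rw [← List.map_reverse, reverse_range_map, List.map_map]
  apply List.map_congr_left
  intro x _
  show (List.range m).map (fun y => (cols.getD y []).getD (n - 1 - x) ' ') = colOf cols (n - 1 - x)
  unfold colOf
  exact map_getD_of_length cols m hc (f := fun r => r.getD (n - 1 - x) ' ')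

theorem spinA_eq_spinAlt (g : List (List Char)) (hg : RectG g) :
    ["north", "west", "south", "east"].foldl rollDirection g = spinAlt g := by
  set M := (g.headD []).length with hMdef
  have hr : ∀ r ∈ g, r.length = M := hg
  set cols1 := (List.range M).map (fun y => tiltRun (colOf g y)) with hcols1
  set g1 := (List.range g.length).map
    (fun x => (List.range M).map (fun y => (cols1.getD y []).getD x ' ')) with hg1
  set g2 := g1.map tiltRun with hg2
  set cols2 := (List.range M).map (fun y => tiltRun (colOf g2 y).reverse) with hcols2
  set g3 := (List.range g.length).map
    (fun x => (List.range M).map (fun y => (cols2.getD y []).getD (g.length - 1 - x) ' ')) with hg3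
  have hspin : spinAlt g = g3.map (fun row => (tiltRun row.reverse).reverse) := rfl
  have hA1 : rollDirection g "north" = g1 := by
    rw [rollNorth g M hMdef.symm hr, hg1,
      rebuild_eq_trG cols1 g.length M (by rw [hcols1]; simp)]
    congr 1
    rw [hcols1]
    unfold trG
    rw [List.map_map]
    rfl
  have hshape1 : g1.map List.length = g.map List.length := by
    rw [← hA1]
    exact shape_rollDirection g "north"
  have hlen1 : g1.length = g.length := length_of_shape_eq _ _ hshape1
  have hM1 : (g1.headD []).length = M := (headLen_of_shape_eq g g1 hshape1).trans hMdef.symm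
  have hr1 : ∀ r ∈ g1, r.length = M := rectM_of_shape_eq g g1 M hshape1 hr
  have hA2 : rollDirection g1 "west" = g2 := by
    rw [rollWest g1 M hM1 hr1, hg2]
  have hshape2 : g2.map List.length = g.map List.length := by
    rw [hg2, List.map_map]
    calc g1.map (List.length ∘ tiltRun) = g1.map List.length :=
          List.map_congr_left (fun r _ => length_tiltRun r)
      _ = g.map List.length := hshape1
  have hlen2 : g2.length = g.length := length_of_shape_eq _ _ hshape2
  have hM2 : (g2.headD []).length = M := (headLen_of_shape_eq g g2 hshape2).trans hMdef.symm
  have hr2 : ∀ r ∈ g2, r.length = M := rectM_of_shape_eq g g2 M hshape2 hr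
  have hA3 : rollDirection g2 "south" = g3 := by
    rw [rollSouth g2 M hM2 hr2, hlen2, hg3,
      rebuild_rev_eq cols2 g.length M (by rw [hcols2]; simp)]
    congr 2
    rw [hcols2]
    unfold trG
    rw [List.map_map, List.map_map]
    rfl
  have hshape3 : g3.map List.length = g.map List.length := by
    rw [← hA3]
    exact (shape_rollDirection g2 "south").trans hshape2
  have hM3 : (g3.headD []).length = M := (headLen_of_shape_eq g g3 hshape3).trans hMdef.symm
  have hr3 : ∀ r ∈ g3, r.length = M := rectM_of_shape_eq g g3 M hshape3 hr
  have hA4 : rollDirection g3 "east" = g3.map (fun row => (tiltRun row.reverse).reverse) := by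
    rw [rollEast g3 M hM3 hr3, List.map_map, List.map_map]
    rfl
  simp only [List.foldl_cons, List.foldl_nil]
  rw [hA1, hA2, hA3, hA4, hspin]

theorem rectG_of_shape_eq (g g' : List (List Char))
    (h : g'.map List.length = g.map List.length) (hg : RectG g) : RectG g' := by
  have hh : (g'.headD []).length = (g.headD []).length := by
    cases g' with
    | nil => cases g with
      | nil => rfl
      | cons a l => simp at h
    | cons a l => cases g with
      | nil => simp at h
      | cons b l' => simp at h; simp [h.1]
  intro r hr
  have : r.length ∈ g'.map List.length := List.mem_map_of_mem hr
  rw [h] at this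
  obtain ⟨r', hr', hlen⟩ := List.mem_map.1 this
  rw [← hlen, hg r' hr', hh]

theorem loopAB (fuel : Nat) : ∀ (cid : Int) (g : List (List Char))
    (g2s : PySem.Dict String Int) (s2g : PySem.Dict Int (List String)), RectG g →
    part2LoopA fuel cid g g2s s2g = part2LoopB fuel cid g g2s s2g := by
  induction fuel with
  | zero => intro cid g g2s s2g _; rfl
  | succ fuel ih =>
    intro cid g g2s s2g hg
    rw [part2LoopA, part2LoopB]
    cases hmatch : g2s.get? (stateOf g) with
    | some s => rfl
    | none =>
      simp only
      rw [spinA_eq_spinAlt g hg]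
      exact ih _ _ _ _ (by
        rw [← spinA_eq_spinAlt g hg]
        exact rectG_of_shape_eq g _ (shape_spinA g) hg)

-- ===== VERDICT (by name: the statement is the Claim_ definition above) =====
theorem part2_spec : Claim_equal_part2 := by
  intro text _ hpre
  unfold Spec_part2 part2 part2_alt
  apply loopAB
  intro r hr
  obtain ⟨l, hl, rfl⟩ := List.mem_map.1 hr
  obtain ⟨l0, rest, hcons⟩ : ∃ l0 rest, PySem.Str.splitlines text = l0 :: rest := by
    cases h : PySem.Str.splitlines text with
    | nil => exact absurd h hpre.1
    | cons a l => exact ⟨a, l, rfl⟩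
  have := hpre.2 l hl
  rw [hcons] at this ⊢
  simpa using this
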